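-- pv_equiv track=rewrite | github.com/hausen123/mlp | src/utils/processors.py | parse_strategies
-- ===== SOURCE A (Python) =====
-- from typing import Optional, List, Dict, Any
--
-- def parse_strategies(response: Optional[str]) -> List[str]:
--     """レスポンスから戦略をパースする"""
--     if not response:
--         return []
--
--     strategies = []
--     if '<start_strategies>' in response:
--         strategy_section = response.split('<start_strategies>')[1]
--     else:
--         strategy_section = response
--
--     lines = strategy_section.split('\n')
--     current_strategy = []
--     for line in lines:
--         if line.strip().startswith('##'):
--             if current_strategy:
--                 strategies.append('\n'.join(current_strategy))
--             current_strategy = [line.strip()]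
--         elif line.strip() and current_strategy:
--             current_strategy.append(line.strip())
--
--     if current_strategy:
--         strategies.append('\n'.join(current_strategy))
--     return strategies
-- ===== SOURCE B (Python) =====
-- from typing import Optional, List
--
-- def _blocks(lines):
--     """lines[0] (if any) is a '##' header; slice off one block, recurse on the rest."""
--     if not lines:
--         return []
--     body = []
--     for l in lines[1:]:
--         if l.startswith('##'):
--             break
--         body.append(l)
--     rest = lines[1 + len(body):]
--     return ['\n'.join(lines[:1] + body)] + _blocks(rest)
--
-- def parse_strategies(response: Optional[str]) -> List[str]:
--     """レスポンスから戦略をパースする"""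
--     if not response:
--         return []
--     if '<start_strategies>' in response:
--         strategy_section = response.split('<start_strategies>')[1]
--     else:
--         strategy_section = response
--     clean = [l.strip() for l in strategy_section.split('\n') if l.strip()]
--     i = 0
--     while i < len(clean) and not clean[i].startswith('##'):
--         i += 1
--     return _blocks(clean[i:])
-- ===== Notes on version B (the rewrite author's own statement) =====
-- stated objective: alternative
-- what changed: Replaces the per-line accumulator state machine with a strip-and-filter pass followed by recursive boundary slicing: drop the lines before the first header line, then repeatedly take one header plus its non-header body as a block.
import Mathlib
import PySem

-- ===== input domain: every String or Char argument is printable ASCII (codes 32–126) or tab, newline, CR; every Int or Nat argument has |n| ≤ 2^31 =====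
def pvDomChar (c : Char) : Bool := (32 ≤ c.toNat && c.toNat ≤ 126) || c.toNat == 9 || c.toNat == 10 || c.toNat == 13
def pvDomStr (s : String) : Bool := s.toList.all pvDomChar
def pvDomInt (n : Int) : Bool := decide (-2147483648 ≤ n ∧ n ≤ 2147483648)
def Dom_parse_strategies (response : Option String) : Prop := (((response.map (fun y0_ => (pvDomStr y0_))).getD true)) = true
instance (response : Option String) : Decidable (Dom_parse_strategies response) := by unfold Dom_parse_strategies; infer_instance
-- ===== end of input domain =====

-- B replaces A's per-line accumulator state machine by a strip-and-filter pass plus recursive slicing at header lines (objective: alternative decomposition, same cost).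

-- ===== PORT A =====
-- strategy_section: response.split('<start_strategies>')[1] if present (index 1 always exists then; getD "" unreachable), else response
def pvSectionA (r : String) : String :=
  if PySem.Str.isIn "<start_strategies>" r then
    (PySem.List.pyGet? ((PySem.Str.split? r "<start_strategies>").getD []) 1).getD ""
  else r

-- one iteration of A's for-loop; state = (strategies, current_strategy)
def pvStepA (st : List String × List String) (line : String) : List String × List String :=
  let t := PySem.Str.strip line
  if PySem.Str.startswith t "##" then
    ((if st.2 ≠ [] then st.1 ++ [PySem.Str.join "\n" st.2] else st.1), [t])
  else if t ≠ "" ∧ st.2 ≠ [] then (st.1, st.2 ++ [t])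
  else st

def parse_strategies (response : Option String) : List String :=
  match response with
  | none => []
  | some r =>
    if r = "" then []
    else
      let lines := (PySem.Str.split? (pvSectionA r) "\n").getD []
      let st := lines.foldl pvStepA ([], [])
      if st.2 ≠ [] then st.1 ++ [PySem.Str.join "\n" st.2] else st.1

-- ===== PORT B =====
def pvSectionB (r : String) : String :=
  if PySem.Str.isIn "<start_strategies>" r then
    (PySem.List.pyGet? ((PySem.Str.split? r "<start_strategies>").getD []) 1).getD ""
  else r

-- _blocks: take one header plus its non-header body, recurse on the remainder
def pvBlocks : List String → List String
  | [] => []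
  | h :: rest =>
    let body := rest.takeWhile (fun l => !PySem.Str.startswith l "##")
    PySem.Str.join "\n" (h :: body) :: pvBlocks (rest.drop body.length)
termination_by l => l.length
decreasing_by
  simp only [List.length_cons, List.length_drop]
  omega

def parse_strategies_alt (response : Option String) : List String :=
  match response with
  | none => []
  | some r =>
    if r = "" then []
    else
      let clean := (((PySem.Str.split? (pvSectionB r) "\n").getD []).filter
        (fun l => PySem.Str.strip l ≠ "")).map PySem.Str.strip
      pvBlocks (clean.dropWhile (fun l => !PySem.Str.startswith l "##"))

-- ===== PRECONDITION & SPEC =====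
def Spec_parse_strategies (response : Option String) (out : List String) : Prop := out = parse_strategies_alt response
instance (response : Option String) (out : List String) : Decidable (Spec_parse_strategies response out) := by unfold Spec_parse_strategies; infer_instance

-- ===== CLAIM (what is proved, stated in full; the proofs are below) =====
def Claim_equal_parse_strategies : Prop := ∀ (response : Option String), Dom_parse_strategies response → Spec_parse_strategies response (parse_strategies response)

-- ===== LEMMAS AND PROOFS =====

-- A's step on already-stripped, nonempty lines
def pvStepC (st : List String × List String) (t : String) : List String × List String :=
  if PySem.Str.startswith t "##" then
    ((if st.2 ≠ [] then st.1 ++ [PySem.Str.join "\n" st.2] else st.1), [t])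
  else if st.2 ≠ [] then (st.1, st.2 ++ [t])
  else st

def pvFinish (st : List String × List String) : List String :=
  if st.2 ≠ [] then st.1 ++ [PySem.Str.join "\n" st.2] else st.1

-- L.dropWhile p, written the way pvBlocks advances (drop by the takeWhile's length)
lemma pv_dropWhile_eq_drop (p : String → Bool) (l : List String) :
    l.dropWhile p = l.drop (l.takeWhile p).length := by
  induction l with
  | nil => rfl
  | cons a l ih => by_cases h : p a <;> simp [h, ih]

lemma pvBlocks_nil : pvBlocks [] = [] := by simp [pvBlocks]

lemma pvBlocks_cons (h : String) (rest : List String) :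
    pvBlocks (h :: rest) =
      PySem.Str.join "\n" (h :: rest.takeWhile (fun l => !PySem.Str.startswith l "##")) ::
        pvBlocks (rest.dropWhile (fun l => !PySem.Str.startswith l "##")) := by
  rw [pvBlocks, pv_dropWhile_eq_drop]

lemma pv_fold_clean (L : List String) (st : List String × List String) :
    L.foldl pvStepA st = ((L.filter (fun l => PySem.Str.strip l ≠ "")).map PySem.Str.strip).foldl pvStepC st := by
  induction L generalizing st with
  | nil => simp
  | cons l L ih =>
    by_cases h : PySem.Str.strip l = ""
    · have hne : PySem.Str.startswith (PySem.Str.strip l) "##" = false := by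
        rw [h]; decide
      have hstep : pvStepA st l = st := by
        rw [pvStepA]; rw [hne]; simp [h]
      rw [List.foldl_cons, hstep, List.filter_cons, if_neg (by simp [h]), ih]
    · have hstep : pvStepA st l = pvStepC st (PySem.Str.strip l) := by
        rw [pvStepA, pvStepC]
        by_cases hh : PySem.Str.startswith (PySem.Str.strip l) "##" = true
        · rw [hh]; simp
        · rw [Bool.not_eq_true] at hh
          rw [hh]; simp [h]
      rw [List.foldl_cons, hstep, List.filter_cons, if_pos (by simp [h]), List.map_cons,
        List.foldl_cons, ih]

lemma pv_core (L : List String) (hL : ∀ t ∈ L, t ≠ "") (strs cur : List String) :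
    pvFinish (L.foldl pvStepC (strs, cur)) =
      strs ++ (if cur = [] then pvBlocks (L.dropWhile (fun l => !PySem.Str.startswith l "##"))
        else PySem.Str.join "\n" (cur ++ L.takeWhile (fun l => !PySem.Str.startswith l "##")) ::
          pvBlocks (L.dropWhile (fun l => !PySem.Str.startswith l "##"))) := by
  induction L generalizing strs cur with
  | nil =>
    by_cases hc : cur = [] <;> simp [pvFinish, hc, pvBlocks_nil]
  | cons t L ih =>
    have ht : t ≠ "" := hL t (by simp)
    have hL' : ∀ s ∈ L, s ≠ "" := fun s hs => hL s (by simp [hs])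
    by_cases hh : PySem.Str.startswith t "##" = true
    · have hstep : pvStepC (strs, cur) t =
          ((if cur ≠ [] then strs ++ [PySem.Str.join "\n" cur] else strs), [t]) := by
        rw [pvStepC]; rw [hh]; simp
      rw [List.foldl_cons, hstep, ih hL']
      rw [List.dropWhile_cons, List.takeWhile_cons, hh]
      simp only [Bool.not_true, Bool.false_eq_true, if_false]
      rw [pvBlocks_cons]
      by_cases hc : cur = [] <;> simp [hc]
    · rw [Bool.not_eq_true] at hh
      by_cases hc : cur = []
      · have hstep : pvStepC (strs, cur) t = (strs, cur) := by
          rw [pvStepC]; rw [hh]; simp [hc]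
        rw [List.foldl_cons, hstep, ih hL', List.dropWhile_cons, hh]
        simp [hc]
      · have hstep : pvStepC (strs, cur) t = (strs, cur ++ [t]) := by
          rw [pvStepC]; rw [hh]; simp [hc]
        rw [List.foldl_cons, hstep, ih hL', List.dropWhile_cons, List.takeWhile_cons, hh]
        simp [hc]

-- ===== VERDICT (by name: the statement is the Claim_ definition above) =====
theorem parse_strategies_spec : Claim_equal_parse_strategies := by
  intro response _
  show parse_strategies response = parse_strategies_alt response
  match response with
  | none => rfl
  | some r =>
    simp only [parse_strategies, parse_strategies_alt]
    by_cases hr : r = ""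
    · simp [hr]
    · simp only [hr, ite_false]
      have hsec : pvSectionB r = pvSectionA r := rfl
      rw [hsec]
      set lines := (PySem.Str.split? (pvSectionA r) "\n").getD [] with hlines
      have hclean : ∀ s ∈ (lines.filter (fun l => PySem.Str.strip l ≠ "")).map PySem.Str.strip, s ≠ "" := by
        intro s hs
        simp only [List.mem_map, List.mem_filter] at hs
        obtain ⟨l, ⟨_, hl⟩, rfl⟩ := hs
        simpa using hl
      have := pv_core ((lines.filter (fun l => PySem.Str.strip l ≠ "")).map PySem.Str.strip) hclean [] []
      rw [pv_fold_clean]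
      simpa [pvFinish] using this
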